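-- pv_equiv track=rewrite | github.com/derBanz/AdventOfCode | AoC2016/day7/script.py | checkaba
-- ===== SOURCE A (Python) =====
-- def checkaba(ipt):
--     valuesaba = []
--     valuesbab = []
--     hyper = False
--     for i, x in enumerate(ipt):
--         hyper = True if (hyper and not x == "]") or x == "[" else False
--         try:
--             if x == ipt[i+2] and ipt[i+1] != x:
--                 var1 = x + ipt[i+1] + x
--                 var2 = ipt[i+1] + x + ipt[i+1]
--                 if (hyper and var2 in valuesaba) or (not hyper and var2 in valuesbab):
--                     return True
--                 elif hyper and var1 not in valuesbab:
--                     valuesbab.append(var1)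
--                 elif not hyper and var1 not in valuesaba:
--                     valuesaba.append(var1)
--         except IndexError:
--             pass
--     return False
-- ===== SOURCE B (Python) =====
-- def checkaba(ipt):
--     # Pass 1: hypernet flag per character (same raw-character bracket toggling as the scan).
--     hyper = False
--     flags = []
--     for x in ipt:
--         hyper = (hyper and x != "]") or x == "["
--         flags.append(hyper)
--     # Pass 2: classify every triplet; store supernet ABAs, and the BAB-complements of hypernet ABAs.
--     aba = set()
--     bab_flipped = set()
--     for x, y, z, h in zip(ipt, ipt[1:], ipt[2:], flags):
--         if x == z and y != x:
--             if h:
--                 bab_flipped.add(y + x + y)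
--             else:
--                 aba.add(x + y + x)
--     return not aba.isdisjoint(bab_flipped)
-- ===== Notes on version B (the rewrite author's own statement) =====
-- stated objective: alternative
-- what changed: A's single scan with early return and two cross-checked dedup lists is replaced by a two-pass decomposition: precompute the hypernet flag per position, collect supernet ABA triplets and the BAB-complements of hypernet triplets into two sets, and finish with one set-disjointness test.
import Mathlib
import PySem

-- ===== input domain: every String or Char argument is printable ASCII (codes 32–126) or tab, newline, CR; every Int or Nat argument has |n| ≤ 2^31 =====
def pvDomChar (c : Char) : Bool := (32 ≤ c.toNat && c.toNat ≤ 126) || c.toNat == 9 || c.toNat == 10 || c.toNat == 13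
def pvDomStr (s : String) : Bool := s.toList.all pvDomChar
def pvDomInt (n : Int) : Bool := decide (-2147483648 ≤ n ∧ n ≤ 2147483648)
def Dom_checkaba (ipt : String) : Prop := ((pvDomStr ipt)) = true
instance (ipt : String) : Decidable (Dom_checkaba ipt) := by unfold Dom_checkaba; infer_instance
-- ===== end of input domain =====

-- B replaces A's early-return scan with two accumulated triplet sets and a final
-- set-disjointness test (objective: alternative decomposition, same cost).

-- ===== PORT A =====
-- literal port of A's loop: enumerate, hyper toggling, indexed lookahead
-- (ipt[i+2] / ipt[i+1] via pyGet?; none = IndexError, skipped like the except),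
-- early return, dedup-append accumulator lists.
def checkabaGo (cs : List Char) : List (Int × Char) → Bool → List String → List String → Bool
  | [], _, _, _ => false
  | (i, x) :: rest, hyper, valuesaba, valuesbab =>
    let hyper := (hyper && !(x == ']')) || x == '['
    match PySem.List.pyGet? cs (i + 2), PySem.List.pyGet? cs (i + 1) with
    | some c2, some c1 =>
      if x == c2 && c1 != x then
        let var1 := String.ofList [x, c1, x]
        let var2 := String.ofList [c1, x, c1]
        if (hyper && valuesaba.contains var2) || (!hyper && valuesbab.contains var2) then
          true
        else if hyper && !(valuesbab.contains var1) then
          checkabaGo cs rest hyper valuesaba (valuesbab ++ [var1])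
        else if !hyper && !(valuesaba.contains var1) then
          checkabaGo cs rest hyper (valuesaba ++ [var1]) valuesbab
        else
          checkabaGo cs rest hyper valuesaba valuesbab
      else
        checkabaGo cs rest hyper valuesaba valuesbab
    | _, _ => checkabaGo cs rest hyper valuesaba valuesbab

def checkaba (ipt : String) : Bool :=
  checkabaGo ipt.toList (PySem.List.enumerate ipt.toList 0) false [] []

-- ===== PORT B =====
-- pass 1 of Source B: the hypernet flag for every character position
def hyperFlags : List Char → Bool → List Bool
  | [], _ => []
  | x :: rest, hyper =>
    let h := (hyper && !(x == ']')) || x == '['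
    h :: hyperFlags rest h

-- zip(ipt, ipt[1:], ipt[2:], flags)
def zip4 {α β γ δ : Type} : List α → List β → List γ → List δ → List (α × β × γ × δ)
  | a :: as, b :: bs, c :: cs, d :: ds => (a, b, c, d) :: zip4 as bs cs ds
  | _, _, _, _ => []

def checkaba_alt (ipt : String) : Bool :=
  let cs := ipt.toList
  let quads := zip4 cs (cs.drop 1) (cs.drop 2) (hyperFlags cs false)
  let sets := quads.foldl
    (fun (st : PySem.Set String × PySem.Set String) q =>
      let (x, y, z, h) := q
      if x == z && y != x then
        if h then (st.1, PySem.Set.add st.2 (String.ofList [y, x, y]))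
        else (PySem.Set.add st.1 (String.ofList [x, y, x]), st.2)
      else st)
    (([], []) : PySem.Set String × PySem.Set String)
  !(PySem.Set.isdisjoint sets.1 sets.2)

-- ===== PRECONDITION & SPEC =====
def Spec_checkaba (ipt : String) (out : Bool) : Prop := out = checkaba_alt ipt
instance (ipt : String) (out : Bool) : Decidable (Spec_checkaba ipt out) := by unfold Spec_checkaba; infer_instance

-- ===== CLAIM (what is proved, stated in full; the proofs are below) =====
def Claim_equal_checkaba : Prop := ∀ (ipt : String), Dom_checkaba ipt → Spec_checkaba ipt (checkaba ipt)

-- ===== LEMMAS AND PROOFS =====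

-- The classified triplet events of the scan: (hyper flag, x, y) for every i with
-- ipt[i] = ipt[i+2] = x ≠ y = ipt[i+1], flag as after processing position i.
def ev : List Char → Bool → List (Bool × Char × Char)
  | [], _ => []
  | [_], _ => []
  | [_, _], _ => []
  | x :: y :: z :: rest, h =>
    let h' := (h && !(x == ']')) || x == '['
    (if x == z && y != x then [(h', x, y)] else []) ++ ev (y :: z :: rest) h'

def enc (p : Char × Char) : String := String.ofList [p.1, p.2, p.1]

lemma enc_inj {p q : Char × Char} (h : enc p = enc q) : p = q := by
  cases p; cases q
  have h2 := congrArg String.toList h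
  simp only [enc] at h2
  simp at h2
  simp [h2.1, h2.2.1]

-- pair-level image of A's loop
def loopP : List (Bool × Char × Char) → List (Char × Char) → List (Char × Char) → Bool
  | [], _, _ => false
  | (h, x, y) :: rest, pa, pb =>
    if (h && pa.contains (y, x)) || (!h && pb.contains (y, x)) then true
    else if h && !(pb.contains (x, y)) then loopP rest pa (pb ++ [(x, y)])
    else if !h && !(pa.contains (x, y)) then loopP rest (pa ++ [(x, y)]) pb
    else loopP rest pa pb

lemma contains_map_enc (l : List (Char × Char)) (p : Char × Char) :
    (l.map enc).contains (enc p) = l.contains p := by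
  simp only [List.contains_eq_mem, decide_eq_decide, List.mem_map]
  constructor
  · rintro ⟨q, hq, he⟩; exact (enc_inj he.symm) ▸ hq
  · exact fun hp => ⟨p, hp, rfl⟩

lemma contains_map_enc' (l : List (Char × Char)) (a b : Char) :
    (l.map enc).contains (String.ofList [a, b, a]) = l.contains (a, b) :=
  contains_map_enc l (a, b)

lemma goA (cs : List Char) (l : List Char) : ∀ (k : Nat) (h : Bool)
    (pa pb : List (Char × Char)), l = cs.drop k →
    checkabaGo cs (PySem.List.enumerate l (k : Int)) h (pa.map enc) (pb.map enc)
      = loopP (ev l h) pa pb := by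
  induction l with
  | nil => intro k h pa pb _; simp [checkabaGo, ev, loopP, PySem.List.enumerate_nil]
  | cons x t ih =>
    intro k h pa pb hl
    have ht : t = cs.drop (k + 1) := by
      have := congrArg List.tail hl
      simpa [List.tail_drop] using this
    have hcast1 : (k : Int) + 1 = ((k + 1 : Nat) : Int) := by push_cast; ring
    have hcast2 : (k : Int) + 2 = ((k + 2 : Nat) : Int) := by push_cast; ring
    have hg1 : PySem.List.pyGet? cs ((k : Int) + 1) = t[0]? := by
      rw [hcast1, PySem.List.pyGet?_natCast, ht]
      simp [List.getElem?_drop]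
    have hg2 : PySem.List.pyGet? cs ((k : Int) + 2) = t[1]? := by
      rw [hcast2, PySem.List.pyGet?_natCast, ht]
      simp [List.getElem?_drop, Nat.add_assoc]
    have hrec : ∀ (h' : Bool) (va vb : List String),
        checkabaGo cs (PySem.List.enumerate t ((k : Int) + 1)) h' va vb
          = checkabaGo cs (PySem.List.enumerate t ((k + 1 : Nat) : Int)) h' va vb := by
      intro h' va vb; rw [hcast1]
    match t, ht, hg1, hg2, hrec with
    | [], ht, hg1, hg2, hrec =>
      have hg2' : PySem.List.pyGet? cs ((k : Int) + 2) = none := by simpa using hg2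
      rw [PySem.List.enumerate_cons, checkabaGo, hg2']
      cases hsnd : PySem.List.pyGet? cs ((k : Int) + 1) <;>
        simp [PySem.List.enumerate_nil, checkabaGo, ev, loopP]
    | [y], ht, hg1, hg2, hrec =>
      have hg2' : PySem.List.pyGet? cs ((k : Int) + 2) = none := by simpa using hg2
      rw [PySem.List.enumerate_cons, checkabaGo, hg2']
      have hres := ih (k + 1) ((h && !(x == ']')) || x == '[') pa pb ht
      rw [← hrec] at hres
      cases hsnd : PySem.List.pyGet? cs ((k : Int) + 1) <;>
        simpa [ev, loopP] using hres
    | y :: z :: r, ht, hg1, hg2, hrec =>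
      have hg1' : PySem.List.pyGet? cs ((k : Int) + 1) = some y := by simpa using hg1
      have hg2' : PySem.List.pyGet? cs ((k : Int) + 2) = some z := by simpa using hg2
      rw [PySem.List.enumerate_cons, checkabaGo, hg1', hg2']
      rw [show ev (x :: y :: z :: r) h
            = (if x == z && y != x then [(((h && !(x == ']')) || x == '['), x, y)] else [])
              ++ ev (y :: z :: r) ((h && !(x == ']')) || x == '[') from rfl]
      by_cases hcond : (x == z && y != x) = true
      · rw [if_pos hcond]
        simp only [hcond, if_true, List.singleton_append, loopP, contains_map_enc']
        by_cases hret : ((h && !(x == ']') || x == '[') && pa.contains (y, x)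
            || !(h && !(x == ']') || x == '[') && pb.contains (y, x)) = true
        · rw [if_pos hret, if_pos hret]
        · rw [if_neg hret, if_neg hret]
          by_cases hb1 : ((h && !(x == ']') || x == '[') && !(pb.contains (x, y))) = true
          · rw [if_pos hb1, if_pos hb1]
            rw [show (pb.map enc) ++ [String.ofList [x, y, x]] = (pb ++ [(x, y)]).map enc by
              simp [enc]]
            rw [hrec, ih (k + 1) _ pa (pb ++ [(x, y)]) ht]
          · rw [if_neg hb1, if_neg hb1]
            by_cases ha1 : (!(h && !(x == ']') || x == '[') && !(pa.contains (x, y))) = true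
            · rw [if_pos ha1, if_pos ha1]
              rw [show (pa.map enc) ++ [String.ofList [x, y, x]] = (pa ++ [(x, y)]).map enc by
                simp [enc]]
              rw [hrec, ih (k + 1) _ (pa ++ [(x, y)]) pb ht]
            · rw [if_neg ha1, if_neg ha1]
              rw [hrec, ih (k + 1) _ pa pb ht]
      · rw [if_neg hcond]
        simp only [hcond, if_false, Bool.false_eq_true, List.nil_append]
        rw [hrec, ih (k + 1) _ pa pb ht]

-- Closed-accumulator characterisation of A's loop
lemma loopP_iff : ∀ (es : List (Bool × Char × Char)) (pa pb : List (Char × Char)),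
    (∀ p ∈ pa, (p.2, p.1) ∉ pb) →
    (loopP es pa pb = true ↔
      ∃ x y, ((false, x, y) ∈ es ∨ (x, y) ∈ pa) ∧ ((true, y, x) ∈ es ∨ (y, x) ∈ pb)) := by
  intro es
  induction es with
  | nil =>
    intro pa pb hcl
    simp only [loopP, List.not_mem_nil, false_or]
    constructor
    · intro h; cases h
    · rintro ⟨x, y, hx, hy⟩; exact absurd hy (hcl (x, y) hx)
  | cons e rest ih =>
    obtain ⟨h, x, y⟩ := e
    intro pa pb hcl
    cases h with
    | true =>
      by_cases hc : (y, x) ∈ pa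
      · simp only [loopP, hc, List.contains_eq_mem, decide_true, Bool.true_and, Bool.true_or,
          if_true]
        constructor
        · intro _; exact ⟨y, x, Or.inr hc, Or.inl (List.mem_cons_self)⟩
        · intro _; trivial
      · by_cases hdup : (x, y) ∈ pb
        · -- duplicate: accumulator unchanged
          have : loopP ((true, x, y) :: rest) pa pb = loopP rest pa pb := by
            simp [loopP, hc, hdup]
          rw [this, ih pa pb hcl]
          constructor
          · rintro ⟨a, b, ha, hb⟩
            exact ⟨a, b, Or.imp (fun q => List.mem_cons_of_mem _ q) id ha,
              Or.imp (fun q => List.mem_cons_of_mem _ q) id hb⟩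
          · rintro ⟨a, b, ha, hb⟩
            refine ⟨a, b, ?_, ?_⟩
            · rcases ha with ha | ha
              · rcases List.mem_cons.mp ha with h1 | h1
                · cases h1
                · exact Or.inl h1
              · exact Or.inr ha
            · rcases hb with hb | hb
              · rcases List.mem_cons.mp hb with h1 | h1
                · -- (true,b,a) = (true,x,y): then (b,a) = (x,y) ∈ pb
                  have h2 : (b, a) = (x, y) := congrArg Prod.snd h1
                  exact Or.inr (h2 ▸ hdup)
                · exact Or.inl h1
              · exact Or.inr hb
        · have hstep : loopP ((true, x, y) :: rest) pa pb = loopP rest pa (pb ++ [(x, y)]) := by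
            simp [loopP, hc, hdup]
          have hcl' : ∀ p ∈ pa, (p.2, p.1) ∉ pb ++ [(x, y)] := by
            intro p hp hmem
            rcases List.mem_append.mp hmem with h1 | h1
            · exact hcl p hp h1
            · have : (p.2, p.1) = (x, y) := List.mem_singleton.mp h1
              have hpxy : p = (y, x) := by
                obtain ⟨p1, p2⟩ := p
                have h1' := congrArg Prod.fst this
                have h2' := congrArg Prod.snd this
                simp at h1' h2'
                simp [h1', h2']
              exact hc (hpxy ▸ hp)
          rw [hstep, ih pa _ hcl']
          constructor
          · rintro ⟨a, b, ha, hb⟩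
            refine ⟨a, b, Or.imp (fun q => List.mem_cons_of_mem _ q) id ha, ?_⟩
            rcases hb with hb | hb
            · exact Or.inl (List.mem_cons_of_mem _ hb)
            · rcases List.mem_append.mp hb with h1 | h1
              · exact Or.inr h1
              · have : (b, a) = (x, y) := List.mem_singleton.mp h1
                have h3 : (true, b, a) = ((true, x, y) : Bool × Char × Char) :=
                  congrArg (Prod.mk true) this
                exact Or.inl (h3 ▸ List.mem_cons_self)
          · rintro ⟨a, b, ha, hb⟩
            refine ⟨a, b, ?_, ?_⟩
            · rcases ha with ha | ha
              · rcases List.mem_cons.mp ha with h1 | h1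
                · cases h1
                · exact Or.inl h1
              · exact Or.inr ha
            · rcases hb with hb | hb
              · rcases List.mem_cons.mp hb with h1 | h1
                · have h2 : (b, a) = (x, y) := congrArg Prod.snd h1
                  exact Or.inr (List.mem_append.mpr (Or.inr (List.mem_singleton.mpr h2)))
                · exact Or.inl h1
              · exact Or.inr (List.mem_append.mpr (Or.inl hb))
    | false =>
      by_cases hc : (y, x) ∈ pb
      · simp only [loopP, hc, List.contains_eq_mem, decide_true, Bool.not_false, Bool.true_and,
          Bool.false_and, Bool.false_or, if_true]
        constructor
        · intro _; exact ⟨x, y, Or.inl (List.mem_cons_self), Or.inr hc⟩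
        · intro _; trivial
      · by_cases hdup : (x, y) ∈ pa
        · have hstep : loopP ((false, x, y) :: rest) pa pb = loopP rest pa pb := by
            simp [loopP, hc, hdup]
          rw [hstep, ih pa pb hcl]
          constructor
          · rintro ⟨a, b, ha, hb⟩
            exact ⟨a, b, Or.imp (fun q => List.mem_cons_of_mem _ q) id ha,
              Or.imp (fun q => List.mem_cons_of_mem _ q) id hb⟩
          · rintro ⟨a, b, ha, hb⟩
            refine ⟨a, b, ?_, ?_⟩
            · rcases ha with ha | ha
              · rcases List.mem_cons.mp ha with h1 | h1
                · have h2 : (a, b) = (x, y) := congrArg Prod.snd h1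
                  exact Or.inr (h2 ▸ hdup)
                · exact Or.inl h1
              · exact Or.inr ha
            · rcases hb with hb | hb
              · rcases List.mem_cons.mp hb with h1 | h1
                · cases h1
                · exact Or.inl h1
              · exact Or.inr hb
        · have hstep : loopP ((false, x, y) :: rest) pa pb = loopP rest (pa ++ [(x, y)]) pb := by
            simp [loopP, hc, hdup]
          have hcl' : ∀ p ∈ pa ++ [(x, y)], (p.2, p.1) ∉ pb := by
            intro p hp hmem
            rcases List.mem_append.mp hp with h1 | h1
            · exact hcl p h1 hmem
            · have hpxy : p = (x, y) := List.mem_singleton.mp h1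
              subst hpxy
              exact hc hmem
          rw [hstep, ih _ pb hcl']
          constructor
          · rintro ⟨a, b, ha, hb⟩
            refine ⟨a, b, ?_, Or.imp (fun q => List.mem_cons_of_mem _ q) id hb⟩
            rcases ha with ha | ha
            · exact Or.inl (List.mem_cons_of_mem _ ha)
            · rcases List.mem_append.mp ha with h1 | h1
              · exact Or.inr h1
              · have h2 : (a, b) = (x, y) := List.mem_singleton.mp h1
                have h3 : (false, a, b) = ((false, x, y) : Bool × Char × Char) :=
                  congrArg (Prod.mk false) h2
                exact Or.inl (h3 ▸ List.mem_cons_self)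
          · rintro ⟨a, b, ha, hb⟩
            refine ⟨a, b, ?_, ?_⟩
            · rcases ha with ha | ha
              · rcases List.mem_cons.mp ha with h1 | h1
                · have h2 : (a, b) = (x, y) := congrArg Prod.snd h1
                  exact Or.inr (List.mem_append.mpr (Or.inr (List.mem_singleton.mpr h2)))
                · exact Or.inl h1
              · exact Or.inr (List.mem_append.mpr (Or.inl ha))
            · rcases hb with hb | hb
              · rcases List.mem_cons.mp hb with h1 | h1
                · cases h1
                · exact Or.inl h1
              · exact Or.inr hb

lemma exists_mem_cons_same (x y : Char) (es : List (Bool × Char × Char)) (t : String)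
    (hb : Bool) (f : Char → Char → String) :
    (∃ a b, (hb, a, b) ∈ ((hb, x, y) :: es) ∧ t = f a b) ↔
      (t = f x y ∨ ∃ a b, (hb, a, b) ∈ es ∧ t = f a b) := by
  constructor
  · rintro ⟨a, b, hab, ht⟩
    rcases List.mem_cons.mp hab with h1 | h1
    · have h2 : (a, b) = (x, y) := congrArg Prod.snd h1
      have ha : a = x := congrArg Prod.fst h2
      have hbb : b = y := congrArg Prod.snd h2
      exact Or.inl (by rw [ht, ha, hbb])
    · exact Or.inr ⟨a, b, h1, ht⟩
  · rintro (ht | ⟨a, b, hab, ht⟩)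
    · exact ⟨x, y, List.mem_cons_self, ht⟩
    · exact ⟨a, b, List.mem_cons_of_mem _ hab, ht⟩

lemma exists_mem_cons_other (x y : Char) (es : List (Bool × Char × Char)) (t : String)
    (hb hb' : Bool) (hne : hb ≠ hb') (f : Char → Char → String) :
    (∃ a b, (hb, a, b) ∈ ((hb', x, y) :: es) ∧ t = f a b) ↔
      (∃ a b, (hb, a, b) ∈ es ∧ t = f a b) := by
  constructor
  · rintro ⟨a, b, hab, ht⟩
    rcases List.mem_cons.mp hab with h1 | h1
    · exact absurd (congrArg Prod.fst h1) hne
    · exact ⟨a, b, h1, ht⟩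
  · rintro ⟨a, b, hab, ht⟩
    exact ⟨a, b, List.mem_cons_of_mem _ hab, ht⟩

-- membership in B's accumulated sets
lemma foldB_mem (cs : List Char) : ∀ (h : Bool) (st : PySem.Set String × PySem.Set String),
    (∀ t, t ∈ ((zip4 cs (cs.drop 1) (cs.drop 2) (hyperFlags cs h)).foldl
        (fun (st : PySem.Set String × PySem.Set String) q =>
          let (x, y, z, hh) := q
          if x == z && y != x then
            if hh then (st.1, PySem.Set.add st.2 (String.ofList [y, x, y]))
            else (PySem.Set.add st.1 (String.ofList [x, y, x]), st.2)
          else st) st).1 ↔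
      t ∈ st.1 ∨ ∃ x y, (false, x, y) ∈ ev cs h ∧ t = enc (x, y)) ∧
    (∀ t, t ∈ ((zip4 cs (cs.drop 1) (cs.drop 2) (hyperFlags cs h)).foldl
        (fun (st : PySem.Set String × PySem.Set String) q =>
          let (x, y, z, hh) := q
          if x == z && y != x then
            if hh then (st.1, PySem.Set.add st.2 (String.ofList [y, x, y]))
            else (PySem.Set.add st.1 (String.ofList [x, y, x]), st.2)
          else st) st).2 ↔
      t ∈ st.2 ∨ ∃ x y, (true, x, y) ∈ ev cs h ∧ t = enc (y, x)) := by
  induction cs with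
  | nil => intro h st; simp [zip4, ev]
  | cons x t ih =>
    cases t with
    | nil => intro h st; simp [zip4, ev, hyperFlags]
    | cons y t2 =>
      cases t2 with
      | nil => intro h st; simp [zip4, ev, hyperFlags]
      | cons z r =>
        intro h st
        rw [show zip4 (x :: y :: z :: r) ((x :: y :: z :: r).drop 1) ((x :: y :: z :: r).drop 2)
              (hyperFlags (x :: y :: z :: r) h)
            = (x, y, z, ((h && !(x == ']')) || x == '[')) ::
              zip4 (y :: z :: r) ((y :: z :: r).drop 1) ((y :: z :: r).drop 2)
                (hyperFlags (y :: z :: r) ((h && !(x == ']')) || x == '[')) from rfl]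
        rw [show ev (x :: y :: z :: r) h
            = (if x == z && y != x then [((((h && !(x == ']')) || x == '[')), x, y)] else [])
              ++ ev (y :: z :: r) ((h && !(x == ']')) || x == '[') from rfl]
        generalize ((h && !(x == ']')) || x == '[') = h'
        by_cases hcond : (x == z && y != x) = true
        · cases h' with
          | true =>
            rw [hcond]
            simp only [List.foldl_cons, hcond, if_true, List.singleton_append]
            obtain ⟨ih1, ih2⟩ := ih true (st.1, PySem.Set.add st.2 (String.ofList [y, x, y]))
            constructor
            · intro u
              rw [ih1 u, exists_mem_cons_other x y _ u false true (by simp) _]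
            · intro u
              rw [ih2 u, exists_mem_cons_same x y _ u true (fun a b => enc (b, a))]
              simp only [PySem.Set.mem_add, enc]
              tauto
          | false =>
            rw [hcond]
            simp only [List.foldl_cons, hcond, if_true, if_false, Bool.false_eq_true,
              List.singleton_append]
            obtain ⟨ih1, ih2⟩ := ih false (PySem.Set.add st.1 (String.ofList [x, y, x]), st.2)
            constructor
            · intro u
              rw [ih1 u, exists_mem_cons_same x y _ u false (fun a b => enc (a, b))]
              simp only [PySem.Set.mem_add, enc]
              tauto
            · intro u
              rw [ih2 u, exists_mem_cons_other x y _ u true false (by simp) _]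
        · have hcond' : (x == z && y != x) = false := by simpa using hcond
          rw [hcond']
          simp only [List.foldl_cons, hcond', if_false, Bool.false_eq_true, List.nil_append]
          exact ih h' st

lemma checkaba_iff (ipt : String) :
    checkaba ipt = true ↔
      ∃ x y, (false, x, y) ∈ ev ipt.toList false ∧ (true, y, x) ∈ ev ipt.toList false := by
  have h0 := goA ipt.toList ipt.toList 0 false [] [] (by simp)
  simp only [List.map_nil, Nat.cast_zero] at h0
  unfold checkaba
  rw [h0, loopP_iff (ev ipt.toList false) [] [] (by simp)]
  simp

lemma checkaba_alt_iff (ipt : String) :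
    checkaba_alt ipt = true ↔
      ∃ x y, (false, x, y) ∈ ev ipt.toList false ∧ (true, y, x) ∈ ev ipt.toList false := by
  obtain ⟨m1, m2⟩ := foldB_mem ipt.toList false (([], []) : PySem.Set String × PySem.Set String)
  simp only [List.not_mem_nil, false_or] at m1 m2
  unfold checkaba_alt
  simp only [Bool.not_eq_true', Bool.eq_false_iff, Ne, PySem.Set.isdisjoint_iff]
  push_neg
  constructor
  · rintro ⟨u, hu1, hu2⟩
    obtain ⟨a, b, hab, rfl⟩ := (m1 u).mp hu1
    obtain ⟨c, d, hcd, he⟩ := (m2 _).mp hu2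
    have h2 : (a, b) = (d, c) := enc_inj he
    have hd : a = d := congrArg Prod.fst h2
    have hcc : b = c := congrArg Prod.snd h2
    exact ⟨a, b, hab, by rw [hcc, hd]; exact hcd⟩
  · rintro ⟨a, b, h1, h2⟩
    exact ⟨enc (a, b), (m1 _).mpr ⟨a, b, h1, rfl⟩, (m2 _).mpr ⟨b, a, h2, rfl⟩⟩

-- ===== VERDICT (by name: the statement is the Claim_ definition above) =====
theorem checkaba_spec : Claim_equal_checkaba := by
  intro ipt _
  unfold Spec_checkaba
  exact Bool.eq_iff_iff.mpr ((checkaba_iff ipt).trans (checkaba_alt_iff ipt).symm)
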